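-- pv_equiv track=rewrite | github.com/StarSein/BaekJoon | 백준/Gold/11062. 카드 게임/카드 게임.py | solution
-- ===== SOURCE A (Python) =====
-- from typing import List
--
-- def solution(n: int, nums: List[int]) -> int:
--     nums.insert(0, 0)
--     dp = [[-1] * (n + 1) for _ in range(n + 1)]
--     prefs = [0] * (n + 1)
--     for i in range(1, n + 1):
--         prefs[i] = prefs[i - 1] + nums[i]
--
--     for i in range(1, n + 1):
--         dp[i][i] = nums[i]
--
--     for i in range(1, n):
--         for l in range(1, n + 1 - i):
--             r = l + i
--             dp[l][r] = max(nums[l] + prefs[r] - prefs[l] - dp[l + 1][r],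
--                            nums[r] + prefs[r - 1] - prefs[l - 1] - dp[l][r - 1])
--
--     return dp[1][n]
-- ===== SOURCE B (Python) =====
-- from typing import List
--
-- def solution(n: int, nums: List[int]) -> int:
--     nums.insert(0, 0)
--     total = 0
--     for i in range(1, n + 1):
--         total += nums[i]
--     # e[l] = net score (mover minus opponent) on cards l..r for the current right
--     # endpoint r; the classic difference recurrence needs no prefix sums, and the
--     # mover's total is recovered at the end as (total + net)/2.
--     e = [0] * (n + 2)
--     for r in range(1, n + 1):
--         e[r] = nums[r]
--         for l in range(r - 1, 0, -1):
--             e[l] = max(nums[l] - e[l + 1], nums[r] - e[l])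
--     return (total + e[1]) // 2
-- ===== Notes on version B (the rewrite author's own statement) =====
-- stated objective: alternative
-- what changed: B replaces A's mover-total interval DP over prefix sums (length-ordered 2D table) by the net-difference recurrence e(l,r)=max(nums[l]-e(l+1,r), nums[r]-e(l,r-1)), swept column-wise by right endpoint in a 1-D array with no prefix array, recovering the answer as (total+e(1,n))//2.
import Mathlib
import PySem

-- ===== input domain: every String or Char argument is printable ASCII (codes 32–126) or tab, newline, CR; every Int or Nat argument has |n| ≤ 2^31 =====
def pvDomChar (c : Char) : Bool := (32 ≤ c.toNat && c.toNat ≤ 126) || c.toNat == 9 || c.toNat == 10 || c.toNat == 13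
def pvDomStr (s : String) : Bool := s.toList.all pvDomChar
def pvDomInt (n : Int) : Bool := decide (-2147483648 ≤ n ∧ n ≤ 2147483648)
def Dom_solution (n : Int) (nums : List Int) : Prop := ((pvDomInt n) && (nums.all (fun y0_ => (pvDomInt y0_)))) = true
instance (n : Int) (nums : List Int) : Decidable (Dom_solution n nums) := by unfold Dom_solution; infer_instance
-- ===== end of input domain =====

-- B replaces A's mover-total interval DP over prefix sums by the net-difference recurrence
-- e(l,r) = max(nums[l] - e(l+1,r), nums[r] - e(l,r-1)) swept column-wise by right endpoint in a
-- 1-D array, answer (total + e(1,n)) // 2; both Pythons mutate `nums` by the same nums.insert(0,0),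
-- and the equivalence proved here is about the return value.

-- ===== PORT A =====
-- A-side helper: the prefix-sum build loop of Source A
def mkPrefs (n : Int) (nums1 : List Int) : List Int :=
  (PySem.List.pyRange 1 (n + 1) 1).foldl
    (fun prefs i =>
      PySem.List.pySetD prefs i (PySem.List.pyGetD prefs (i - 1) 0 + PySem.List.pyGetD nums1 i 0))
    (List.replicate (n + 1).toNat 0)

-- dp[l][r] read / write (in range under Pre_; pyGetD/pySetD defaults are never hit there)
def dgetA (dp : List (List Int)) (l r : Int) : Int :=
  PySem.List.pyGetD (PySem.List.pyGetD dp l []) r 0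

def dsetA (dp : List (List Int)) (l r : Int) (v : Int) : List (List Int) :=
  PySem.List.pySetD dp l (PySem.List.pySetD (PySem.List.pyGetD dp l []) r v)

def solution (n : Int) (nums : List Int) : Int :=
  let nums1 := PySem.List.insert nums 0 0
  let dp0 : List (List Int) := List.replicate (n + 1).toNat (List.replicate (n + 1).toNat (-1))
  let prefs := mkPrefs n nums1
  let dp1 := (PySem.List.pyRange 1 (n + 1) 1).foldl
    (fun dp i => dsetA dp i i (PySem.List.pyGetD nums1 i 0)) dp0
  let dp2 := (PySem.List.pyRange 1 n 1).foldl (fun dp i =>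
    (PySem.List.pyRange 1 (n + 1 - i) 1).foldl (fun dp l =>
      dsetA dp l (l + i)
        (max (PySem.List.pyGetD nums1 l 0 + PySem.List.pyGetD prefs (l + i) 0 -
                PySem.List.pyGetD prefs l 0 - dgetA dp (l + 1) (l + i))
             (PySem.List.pyGetD nums1 (l + i) 0 + PySem.List.pyGetD prefs (l + i - 1) 0 -
                PySem.List.pyGetD prefs (l - 1) 0 - dgetA dp l (l + i - 1)))) dp) dp1
  dgetA dp2 1 n

-- ===== PORT B =====
def solution_alt (n : Int) (nums : List Int) : Int :=
  let nums1 := PySem.List.insert nums 0 0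
  let total := (PySem.List.pyRange 1 (n + 1) 1).foldl
    (fun t i => t + PySem.List.pyGetD nums1 i 0) 0
  let e0 : List Int := List.replicate (n + 2).toNat 0
  let e := (PySem.List.pyRange 1 (n + 1) 1).foldl (fun e r =>
    let e1 := PySem.List.pySetD e r (PySem.List.pyGetD nums1 r 0)
    (PySem.List.pyRange (r - 1) 0 (-1)).foldl (fun e l =>
      PySem.List.pySetD e l
        (max (PySem.List.pyGetD nums1 l 0 - PySem.List.pyGetD e (l + 1) 0)
             (PySem.List.pyGetD nums1 r 0 - PySem.List.pyGetD e l 0))) e1) e0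
  PySem.Int.floordiv (total + PySem.List.pyGetD e 1 0) 2

-- ===== PRECONDITION & SPEC =====
-- Pre_ = exactly the inputs where the Python A returns: it needs n ≥ 1 (dp[1] and dp[1][n] exist)
-- and n ≤ len(nums) (nums[i] for i = 1..n after the insert); otherwise A raises IndexError.
def Pre_solution (n : Int) (nums : List Int) : Prop := 1 ≤ n ∧ n ≤ (nums.length : Int)
instance (n : Int) (nums : List Int) : Decidable (Pre_solution n nums) := by
  unfold Pre_solution; infer_instance

def pvWitness_solution : Int × List Int := (2, [1, 3])

def Spec_solution (n : Int) (nums : List Int) (out : Int) : Prop := out = solution_alt n nums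
instance (n : Int) (nums : List Int) (out : Int) : Decidable (Spec_solution n nums out) := by
  unfold Spec_solution; infer_instance

-- ===== CLAIM (what is proved, stated in full; the proofs are below) =====
def Claim_equal_solution : Prop := ∀ (n : Int) (nums : List Int), Dom_solution n nums → Pre_solution n nums → Spec_solution n nums (solution n nums)

-- ===== LEMMAS AND PROOFS =====

-- the interval game value (mover's collected total): gval d l = A's dp value on cards l..l+d
def gval (nums1 prefs : List Int) : Nat → Int → Int
  | 0, l => PySem.List.pyGetD nums1 l 0
  | d + 1, l =>
      max (PySem.List.pyGetD nums1 l 0 + PySem.List.pyGetD prefs (l + (d : Int) + 1) 0 -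
             PySem.List.pyGetD prefs l 0 - gval nums1 prefs d (l + 1))
          (PySem.List.pyGetD nums1 (l + (d : Int) + 1) 0 + PySem.List.pyGetD prefs (l + (d : Int)) 0 -
             PySem.List.pyGetD prefs (l - 1) 0 - gval nums1 prefs d l)

-- the net game value (mover minus opponent): B's recurrence
def netval (nums1 : List Int) : Nat → Int → Int
  | 0, l => PySem.List.pyGetD nums1 l 0
  | d + 1, l =>
      max (PySem.List.pyGetD nums1 l 0 - netval nums1 d (l + 1))
          (PySem.List.pyGetD nums1 (l + (d : Int) + 1) 0 - netval nums1 d l)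

-- interval sum nums1[1..k]
def psum (nums1 : List Int) : Nat → Int
  | 0 => 0
  | k + 1 => psum nums1 k + PySem.List.pyGetD nums1 ((k : Int) + 1) 0

lemma gval_int (nums1 prefs : List Int) (i l : Int) (hi : 1 ≤ i) :
    gval nums1 prefs i.toNat l =
      max (PySem.List.pyGetD nums1 l 0 + PySem.List.pyGetD prefs (l + i) 0 -
             PySem.List.pyGetD prefs l 0 - gval nums1 prefs (i - 1).toNat (l + 1))
          (PySem.List.pyGetD nums1 (l + i) 0 + PySem.List.pyGetD prefs (l + i - 1) 0 -
             PySem.List.pyGetD prefs (l - 1) 0 - gval nums1 prefs (i - 1).toNat l) := by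
  have hk : i.toNat = (i - 1).toNat + 1 := by omega
  have hc : ((i - 1).toNat : Int) = i - 1 := Int.toNat_of_nonneg (by omega)
  rw [hk]
  simp only [gval, hc]
  have e1 : l + (i - 1) + 1 = l + i := by ring
  have e2 : l + (i - 1) = l + i - 1 := by ring
  rw [e1, e2]

lemma netval_int (nums1 : List Int) (i l : Int) (hi : 1 ≤ i) :
    netval nums1 i.toNat l =
      max (PySem.List.pyGetD nums1 l 0 - netval nums1 (i - 1).toNat (l + 1))
          (PySem.List.pyGetD nums1 (l + i) 0 - netval nums1 (i - 1).toNat l) := by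
  have hk : i.toNat = (i - 1).toNat + 1 := by omega
  have hc : ((i - 1).toNat : Int) = i - 1 := Int.toNat_of_nonneg (by omega)
  rw [hk]
  simp only [netval, hc]
  have e1 : l + (i - 1) + 1 = l + i := by ring
  rw [e1]

lemma psum_int (nums1 : List Int) (i : Int) (hi : 1 ≤ i) :
    psum nums1 i.toNat = psum nums1 (i - 1).toNat + PySem.List.pyGetD nums1 i 0 := by
  have hk : i.toNat = (i - 1).toNat + 1 := by omega
  have hc : ((i - 1).toNat : Int) = i - 1 := Int.toNat_of_nonneg (by omega)
  rw [hk]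
  simp only [psum, hc]
  have e1 : i - 1 + 1 = i := by ring
  rw [e1]

-- generic invariant rule for a fold over range(a, b)
lemma foldl_pyRange_inv {α : Type} (P : Int → α → Prop) (f : α → Int → α) (a b : Int) (x : α)
    (hab : a ≤ b) (hbase : P a x)
    (hstep : ∀ i y, a ≤ i → i < b → P i y → P (i + 1) (f y i)) :
    P b ((PySem.List.pyRange a b 1).foldl f x) := by
  have H : ∀ (k : Nat) (a : Int) (x : α), (b - a).toNat = k → a ≤ b → P a x →
      (∀ i y, a ≤ i → i < b → P i y → P (i + 1) (f y i)) →
      P b ((PySem.List.pyRange a b 1).foldl f x) := by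
    intro k
    induction k with
    | zero =>
      intro a x hk hab hbase _hstep
      have hab' : a = b := by omega
      subst hab'
      rw [PySem.List.pyRange_one_eq_nil le_rfl]
      simpa using hbase
    | succ k ih =>
      intro a x hk hab hbase hstep
      have hlt : a < b := by omega
      rw [PySem.List.pyRange_one_cons hlt]
      simp only [List.foldl_cons]
      exact ih (a + 1) (f x a) (by omega) (by omega) (hstep a x le_rfl hlt hbase)
        (fun i y h1 h2 hp => hstep i y (by omega) h2 hp)
  exact H (b - a).toNat a x rfl hab hbase hstep

-- generic invariant rule for a fold over the countdown range(a, b, -1)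
lemma foldl_pyRange_neg_inv {α : Type} (P : Int → α → Prop) (f : α → Int → α) (a b : Int) (x : α)
    (hab : b ≤ a) (hbase : P a x)
    (hstep : ∀ i y, b < i → i ≤ a → P i y → P (i - 1) (f y i)) :
    P b ((PySem.List.pyRange a b (-1)).foldl f x) := by
  have H : ∀ (k : Nat) (a : Int) (x : α), (a - b).toNat = k → b ≤ a → P a x →
      (∀ i y, b < i → i ≤ a → P i y → P (i - 1) (f y i)) →
      P b ((PySem.List.pyRange a b (-1)).foldl f x) := by
    intro k
    induction k with
    | zero =>
      intro a x hk hab hbase _hstep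
      have hab' : a = b := by omega
      subst hab'
      rw [PySem.List.pyRange_neg_one_eq_nil le_rfl]
      simpa using hbase
    | succ k ih =>
      intro a x hk hab hbase hstep
      have hlt : b < a := by omega
      rw [PySem.List.pyRange_neg_one_cons hlt]
      simp only [List.foldl_cons]
      exact ih (a - 1) (f x a) (by omega) (by omega) (hstep a x hlt le_rfl hbase)
        (fun i y h1 h2 hp => hstep i y h1 (by omega) hp)
  exact H (a - b).toNat a x rfl hab hbase hstep

-- function-backed view of A's square table
def Tbl (n : Int) (f : Int → Int → Int) : List (List Int) :=
  (PySem.List.pyRange 0 (n + 1) 1).map (fun l => (PySem.List.pyRange 0 (n + 1) 1).map (fun r => f l r))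

lemma Tbl_congr (n : Int) (f f' : Int → Int → Int)
    (h : ∀ l r, 0 ≤ l → l ≤ n → 0 ≤ r → r ≤ n → f l r = f' l r) : Tbl n f = Tbl n f' := by
  unfold Tbl
  apply List.map_congr_left
  intro l hl
  rw [PySem.List.mem_pyRange_one] at hl
  apply List.map_congr_left
  intro r hr
  rw [PySem.List.mem_pyRange_one] at hr
  exact h l r hl.1 (by omega) hr.1 (by omega)

lemma replicate_eq_Tbl (n : Int) :
    (List.replicate (n + 1).toNat (List.replicate (n + 1).toNat (-1 : Int))) = Tbl n (fun _ _ => -1) := by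
  unfold Tbl
  simp [List.map_const', PySem.List.length_pyRange_one]

lemma dgetA_Tbl (n : Int) (f : Int → Int → Int) (l r : Int)
    (hl : 0 ≤ l) (hl2 : l ≤ n) (hr : 0 ≤ r) (hr2 : r ≤ n) :
    dgetA (Tbl n f) l r = f l r := by
  unfold dgetA Tbl
  have hlen : ((PySem.List.pyRange 0 (n + 1) 1).map
      (fun l => (PySem.List.pyRange 0 (n + 1) 1).map (fun r => f l r))).length = (n + 1 - 0).toNat := by
    simp [PySem.List.length_pyRange_one]
  rw [PySem.List.pyGetD_eq_getElem _ _ hl (by rw [hlen]; omega)]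
  rw [List.getElem_map, PySem.List.getElem_pyRange_one]
  have hlen2 : ((PySem.List.pyRange 0 (n + 1) 1).map
      (fun r => f (0 + (l.toNat : Int)) r)).length = (n + 1 - 0).toNat := by
    simp [PySem.List.length_pyRange_one]
  rw [PySem.List.pyGetD_eq_getElem _ _ hr (by rw [hlen2]; omega)]
  rw [List.getElem_map, PySem.List.getElem_pyRange_one]
  have el : (0 : Int) + (l.toNat : Int) = l := by omega
  have er : (0 : Int) + (r.toNat : Int) = r := by omega
  rw [el, er]

lemma dsetA_Tbl (n : Int) (f : Int → Int → Int) (l r v : Int)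
    (hl : 0 ≤ l) (hl2 : l ≤ n) (hr : 0 ≤ r) (_hr2 : r ≤ n) :
    dsetA (Tbl n f) l r v = Tbl n (fun l' r' => if l' = l ∧ r' = r then v else f l' r') := by
  have hrow : PySem.List.pyGetD (Tbl n f) l [] = (PySem.List.pyRange 0 (n + 1) 1).map (fun r => f l r) := by
    unfold Tbl
    have hlen : ((PySem.List.pyRange 0 (n + 1) 1).map
        (fun l => (PySem.List.pyRange 0 (n + 1) 1).map (fun r => f l r))).length = (n + 1 - 0).toNat := by
      simp [PySem.List.length_pyRange_one]
    rw [PySem.List.pyGetD_eq_getElem _ _ hl (by rw [hlen]; omega)]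
    rw [List.getElem_map, PySem.List.getElem_pyRange_one]
    have el : (0 : Int) + (l.toNat : Int) = l := by omega
    rw [el]
  unfold dsetA
  rw [hrow, PySem.List.pySetD_of_nonneg _ _ hr, PySem.List.pySetD_of_nonneg _ _ hl]
  unfold Tbl
  apply List.ext_getElem
  · simp [PySem.List.length_pyRange_one]
  intro k hk1 hk2
  rw [List.getElem_set]
  simp only [List.getElem_map, PySem.List.getElem_pyRange_one]
  by_cases hkl : l.toNat = k
  · rw [if_pos hkl]
    apply List.ext_getElem
    · simp [PySem.List.length_pyRange_one]
    intro j hj1 hj2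
    rw [List.getElem_set]
    simp only [List.getElem_map, PySem.List.getElem_pyRange_one]
    have hkk : (0 : Int) + (k : Int) = l := by omega
    rw [hkk]
    by_cases hjr : r.toNat = j
    · rw [if_pos hjr, if_pos ⟨rfl, by omega⟩]
    · rw [if_neg hjr, if_neg (by intro hcon; omega)]
  · rw [if_neg hkl]
    apply List.map_congr_left
    intro r' hr'
    rw [PySem.List.mem_pyRange_one] at hr'
    rw [if_neg (by intro hcon; omega)]

-- table contents after the outer loop has processed gaps ≤ i
def Fo (nums1 prefs : List Int) (n i : Int) : Int → Int → Int :=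
  fun l r => if 1 ≤ l ∧ l ≤ r ∧ r ≤ n ∧ r - l ≤ i then gval nums1 prefs (r - l).toNat l else -1

-- table contents inside the inner loop of gap i, cells left of l0 already filled
def Fi (nums1 prefs : List Int) (n i l0 : Int) : Int → Int → Int :=
  fun l r => if 1 ≤ l ∧ l ≤ r ∧ r ≤ n ∧ (r - l ≤ i - 1 ∨ (r - l = i ∧ l < l0))
             then gval nums1 prefs (r - l).toNat l else -1

lemma solution_eq_gval (n : Int) (nums : List Int) (hn : 1 ≤ n) :
    solution n nums =
      gval (PySem.List.insert nums 0 0) (mkPrefs n (PySem.List.insert nums 0 0)) (n - 1).toNat 1 := by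
  simp only [solution]
  set nums1 := PySem.List.insert nums 0 0 with hnums1
  set prefs := mkPrefs n nums1 with hprefs
  -- stage 1: the diagonal loop
  have base1 : (List.replicate (n + 1).toNat (List.replicate (n + 1).toNat (-1 : Int)))
      = Tbl n (fun l r => if 1 ≤ l ∧ l < 1 ∧ r = l then PySem.List.pyGetD nums1 l 0 else -1) := by
    rw [replicate_eq_Tbl]
    apply Tbl_congr
    intro l r _ _ _ _
    rw [if_neg (by omega)]
  have step1 : ∀ (i : Int) (dp : List (List Int)), 1 ≤ i → i < n + 1 →
      dp = Tbl n (fun l r => if 1 ≤ l ∧ l < i ∧ r = l then PySem.List.pyGetD nums1 l 0 else -1) →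
      dsetA dp i i (PySem.List.pyGetD nums1 i 0)
        = Tbl n (fun l r => if 1 ≤ l ∧ l < i + 1 ∧ r = l then PySem.List.pyGetD nums1 l 0 else -1) := by
    intro i dp hi1 hi2 hP
    rw [hP, dsetA_Tbl n _ i i _ (by omega) (by omega) (by omega) (by omega)]
    apply Tbl_congr
    intro l r hl0 hln hr0 hrn
    by_cases hc : l = i ∧ r = i
    · rw [if_pos hc, if_pos (by omega), hc.1]
    · rw [if_neg hc]
      by_cases hd : 1 ≤ l ∧ l < i ∧ r = l
      · rw [if_pos hd, if_pos (by omega)]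
      · rw [if_neg hd, if_neg (by omega)]
  have hdiag : List.foldl (fun dp i => dsetA dp i i (PySem.List.pyGetD nums1 i 0))
      (List.replicate (n + 1).toNat (List.replicate (n + 1).toNat (-1 : Int)))
      (PySem.List.pyRange 1 (n + 1) 1)
      = Tbl n (fun l r => if 1 ≤ l ∧ l < n + 1 ∧ r = l then PySem.List.pyGetD nums1 l 0 else -1) :=
    foldl_pyRange_inv
      (P := fun i dp => dp = Tbl n (fun l r =>
        if 1 ≤ l ∧ l < i ∧ r = l then PySem.List.pyGetD nums1 l 0 else -1))
      (fun dp i => dsetA dp i i (PySem.List.pyGetD nums1 i 0)) 1 (n + 1) _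
      (by omega) base1 step1
  have hdiag' : List.foldl (fun dp i => dsetA dp i i (PySem.List.pyGetD nums1 i 0))
      (List.replicate (n + 1).toNat (List.replicate (n + 1).toNat (-1 : Int)))
      (PySem.List.pyRange 1 (n + 1) 1) = Tbl n (Fo nums1 prefs n 0) := by
    rw [hdiag]
    apply Tbl_congr
    intro l r hl0 hln hr0 hrn
    unfold Fo
    by_cases h : 1 ≤ l ∧ l < n + 1 ∧ r = l
    · rw [if_pos h, if_pos (by omega)]
      have hz : r - l = 0 := by omega
      rw [hz]
      rfl
    · rw [if_neg h, if_neg (by omega)]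
  -- stage 2: the interval loop
  have stepIn : ∀ (i : Int), 1 ≤ i → i < n →
      ∀ (l : Int) (dp2 : List (List Int)), 1 ≤ l → l < n + 1 - i →
      dp2 = Tbl n (Fi nums1 prefs n i l) →
      dsetA dp2 l (l + i)
        (max (PySem.List.pyGetD nums1 l 0 + PySem.List.pyGetD prefs (l + i) 0 -
                PySem.List.pyGetD prefs l 0 - dgetA dp2 (l + 1) (l + i))
             (PySem.List.pyGetD nums1 (l + i) 0 + PySem.List.pyGetD prefs (l + i - 1) 0 -
                PySem.List.pyGetD prefs (l - 1) 0 - dgetA dp2 l (l + i - 1)))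
        = Tbl n (Fi nums1 prefs n i (l + 1)) := by
    intro i hi1 hi2 l dp2 hl1 hl2 hR
    rw [hR]
    rw [dgetA_Tbl n _ (l + 1) (l + i) (by omega) (by omega) (by omega) (by omega)]
    rw [dgetA_Tbl n _ l (l + i - 1) (by omega) (by omega) (by omega) (by omega)]
    unfold Fi
    rw [if_pos (by omega), if_pos (by omega)]
    have e1 : l + i - (l + 1) = i - 1 := by ring
    have e2 : l + i - 1 - l = i - 1 := by ring
    rw [e1, e2]
    rw [dsetA_Tbl n _ l (l + i) _ (by omega) (by omega) (by omega) (by omega)]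
    apply Tbl_congr
    intro l' r' hl0' hln' hr0' hrn'
    by_cases hc : l' = l ∧ r' = l + i
    · rw [if_pos hc, if_pos (by omega)]
      have e3 : r' - l' = i := by omega
      rw [e3, hc.1, ← gval_int nums1 prefs i l (by omega)]
    · rw [if_neg hc]
      by_cases hd : 1 ≤ l' ∧ l' ≤ r' ∧ r' ≤ n ∧ (r' - l' ≤ i - 1 ∨ (r' - l' = i ∧ l' < l))
      · rw [if_pos hd, if_pos (by omega)]
      · rw [if_neg hd, if_neg (by omega)]
  have stepOut : ∀ (i : Int) (dp : List (List Int)), 1 ≤ i → i < n →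
      dp = Tbl n (Fo nums1 prefs n (i - 1)) →
      List.foldl (fun dp l =>
        dsetA dp l (l + i)
          (max (PySem.List.pyGetD nums1 l 0 + PySem.List.pyGetD prefs (l + i) 0 -
                  PySem.List.pyGetD prefs l 0 - dgetA dp (l + 1) (l + i))
               (PySem.List.pyGetD nums1 (l + i) 0 + PySem.List.pyGetD prefs (l + i - 1) 0 -
                  PySem.List.pyGetD prefs (l - 1) 0 - dgetA dp l (l + i - 1)))) dp
        (PySem.List.pyRange 1 (n + 1 - i) 1)
        = Tbl n (Fo nums1 prefs n (i + 1 - 1)) := by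
    intro i dp hi1 hi2 hQ
    have hbaseIn : dp = Tbl n (Fi nums1 prefs n i 1) := by
      rw [hQ]
      apply Tbl_congr
      intro l r hl0 hln hr0 hrn
      unfold Fo Fi
      by_cases h : 1 ≤ l ∧ l ≤ r ∧ r ≤ n ∧ r - l ≤ i - 1
      · rw [if_pos (by omega), if_pos (by omega)]
      · rw [if_neg (by omega), if_neg (by omega)]
    have hinner : List.foldl (fun dp l =>
        dsetA dp l (l + i)
          (max (PySem.List.pyGetD nums1 l 0 + PySem.List.pyGetD prefs (l + i) 0 -
                  PySem.List.pyGetD prefs l 0 - dgetA dp (l + 1) (l + i))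
               (PySem.List.pyGetD nums1 (l + i) 0 + PySem.List.pyGetD prefs (l + i - 1) 0 -
                  PySem.List.pyGetD prefs (l - 1) 0 - dgetA dp l (l + i - 1)))) dp
        (PySem.List.pyRange 1 (n + 1 - i) 1)
        = Tbl n (Fi nums1 prefs n i (n + 1 - i)) :=
      foldl_pyRange_inv
        (P := fun l0 dp2 => dp2 = Tbl n (Fi nums1 prefs n i l0))
        (fun dp l =>
          dsetA dp l (l + i)
            (max (PySem.List.pyGetD nums1 l 0 + PySem.List.pyGetD prefs (l + i) 0 -
                    PySem.List.pyGetD prefs l 0 - dgetA dp (l + 1) (l + i))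
                 (PySem.List.pyGetD nums1 (l + i) 0 + PySem.List.pyGetD prefs (l + i - 1) 0 -
                    PySem.List.pyGetD prefs (l - 1) 0 - dgetA dp l (l + i - 1))))
        1 (n + 1 - i) dp (by omega) hbaseIn
        (fun l dp2 h1 h2 hR => stepIn i hi1 hi2 l dp2 h1 h2 hR)
    rw [hinner]
    apply Tbl_congr
    intro l r hl0 hln hr0 hrn
    unfold Fi Fo
    by_cases h : 1 ≤ l ∧ l ≤ r ∧ r ≤ n ∧ (r - l ≤ i - 1 ∨ (r - l = i ∧ l < n + 1 - i))
    · rw [if_pos h, if_pos (by omega)]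
    · rw [if_neg h, if_neg (by omega)]
  have houter : List.foldl (fun dp i =>
      List.foldl (fun dp l =>
        dsetA dp l (l + i)
          (max (PySem.List.pyGetD nums1 l 0 + PySem.List.pyGetD prefs (l + i) 0 -
                  PySem.List.pyGetD prefs l 0 - dgetA dp (l + 1) (l + i))
               (PySem.List.pyGetD nums1 (l + i) 0 + PySem.List.pyGetD prefs (l + i - 1) 0 -
                  PySem.List.pyGetD prefs (l - 1) 0 - dgetA dp l (l + i - 1)))) dp
        (PySem.List.pyRange 1 (n + 1 - i) 1))
      (List.foldl (fun dp i => dsetA dp i i (PySem.List.pyGetD nums1 i 0))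
        (List.replicate (n + 1).toNat (List.replicate (n + 1).toNat (-1 : Int)))
        (PySem.List.pyRange 1 (n + 1) 1))
      (PySem.List.pyRange 1 n 1)
      = Tbl n (Fo nums1 prefs n (n - 1)) :=
    foldl_pyRange_inv
      (P := fun i dp => dp = Tbl n (Fo nums1 prefs n (i - 1)))
      (fun dp i =>
        List.foldl (fun dp l =>
          dsetA dp l (l + i)
            (max (PySem.List.pyGetD nums1 l 0 + PySem.List.pyGetD prefs (l + i) 0 -
                    PySem.List.pyGetD prefs l 0 - dgetA dp (l + 1) (l + i))
                 (PySem.List.pyGetD nums1 (l + i) 0 + PySem.List.pyGetD prefs (l + i - 1) 0 -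
                    PySem.List.pyGetD prefs (l - 1) 0 - dgetA dp l (l + i - 1)))) dp
          (PySem.List.pyRange 1 (n + 1 - i) 1))
      1 n _ hn
      (by rw [hdiag']; norm_num)
      stepOut
  rw [houter]
  rw [dgetA_Tbl n _ 1 n (by omega) (by omega) (by omega) (by omega)]
  unfold Fo
  rw [if_pos (by omega)]

-- ========== B-side machinery: 1-D function-backed array ==========
def Vec1 (m : Int) (f : Int → Int) : List Int :=
  (PySem.List.pyRange 0 m 1).map f

lemma Vec1_congr (m : Int) (f f' : Int → Int)
    (h : ∀ i, 0 ≤ i → i < m → f i = f' i) : Vec1 m f = Vec1 m f' := by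
  unfold Vec1
  apply List.map_congr_left
  intro i hi
  rw [PySem.List.mem_pyRange_one] at hi
  exact h i hi.1 hi.2

lemma replicate_eq_Vec1 (m : Int) :
    (List.replicate m.toNat (0 : Int)) = Vec1 m (fun _ => 0) := by
  unfold Vec1
  simp [List.map_const', PySem.List.length_pyRange_one]

lemma vget_Vec1 (m : Int) (f : Int → Int) (i : Int) (h1 : 0 ≤ i) (h2 : i < m) :
    PySem.List.pyGetD (Vec1 m f) i 0 = f i := by
  unfold Vec1
  have hlen : ((PySem.List.pyRange 0 m 1).map f).length = (m - 0).toNat := by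
    simp [PySem.List.length_pyRange_one]
  rw [PySem.List.pyGetD_eq_getElem _ _ h1 (by rw [hlen]; omega)]
  rw [List.getElem_map, PySem.List.getElem_pyRange_one]
  have e : (0 : Int) + (i.toNat : Int) = i := by omega
  rw [e]

lemma vset_Vec1 (m : Int) (f : Int → Int) (i v : Int) (h1 : 0 ≤ i) (_h2 : i < m) :
    PySem.List.pySetD (Vec1 m f) i v = Vec1 m (fun j => if j = i then v else f j) := by
  rw [PySem.List.pySetD_of_nonneg _ _ h1]
  unfold Vec1
  apply List.ext_getElem
  · simp [PySem.List.length_pyRange_one]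
  intro k hk1 hk2
  rw [List.getElem_set]
  simp only [List.getElem_map, PySem.List.getElem_pyRange_one]
  by_cases hki : i.toNat = k
  · rw [if_pos hki, if_pos (by omega)]
  · rw [if_neg hki, if_neg (by intro hcon; omega)]

-- prefix sums: the built list holds psum
lemma mkPrefs_get (n : Int) (nums1 : List Int) (i : Int) (h1 : 0 ≤ i) (h2 : i ≤ n) :
    PySem.List.pyGetD (mkPrefs n nums1) i 0 = psum nums1 i.toNat := by
  have hrun : mkPrefs n nums1 = Vec1 (n + 1) (fun j => if j < n + 1 then psum nums1 j.toNat else 0) := by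
    unfold mkPrefs
    exact foldl_pyRange_inv
      (P := fun i prefs => prefs = Vec1 (n + 1) (fun j => if j < i then psum nums1 j.toNat else 0))
      _ 1 (n + 1) _ (by omega)
      (by
        rw [replicate_eq_Vec1]
        apply Vec1_congr
        intro j hj1 hj2
        by_cases hj : j < 1
        · have hj0 : j = 0 := by omega
          rw [if_pos hj, hj0]
          rfl
        · rw [if_neg hj])
      (by
        intro i prefs hi1 hi2 hP
        rw [hP]
        rw [vget_Vec1 (n + 1) _ (i - 1) (by omega) (by omega)]
        rw [if_pos (by omega)]
        rw [vset_Vec1 (n + 1) _ i _ (by omega) (by omega)]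
        apply Vec1_congr
        intro j hj1 hj2
        by_cases hji : j = i
        · rw [if_pos hji, if_pos (by omega), hji, psum_int nums1 i hi1]
        · rw [if_neg hji]
          by_cases hjlt : j < i
          · rw [if_pos hjlt, if_pos (by omega)]
          · rw [if_neg hjlt, if_neg (by omega)])
  rw [hrun, vget_Vec1 (n + 1) _ i h1 (by omega), if_pos (by omega)]

-- the bridge: twice the mover's total = interval sum + net value
lemma two_gval (n : Int) (nums1 : List Int) :
    ∀ (d : Nat) (l : Int), 1 ≤ l → l + (d : Int) ≤ n →
      2 * gval nums1 (mkPrefs n nums1) d l =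
        (psum nums1 (l + (d : Int)).toNat - psum nums1 (l - 1).toNat) + netval nums1 d l := by
  intro d
  induction d with
  | zero =>
    intro l hl1 hl2
    simp only [gval, netval, Nat.cast_zero, add_zero]
    have h := psum_int nums1 l hl1
    omega
  | succ d ih =>
    intro l hl1 hl2
    have hdn : ((d : Int) ≥ 0) := by positivity
    have hln : l + (d : Int) + 1 ≤ n := by push_cast at hl2 ⊢; omega
    simp only [gval, netval]
    rw [mkPrefs_get n nums1 (l + (d : Int) + 1) (by omega) (by omega)]
    rw [mkPrefs_get n nums1 l (by omega) (by omega)]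
    rw [mkPrefs_get n nums1 (l + (d : Int)) (by omega) (by omega)]
    rw [mkPrefs_get n nums1 (l - 1) (by omega) (by omega)]
    have ecc : l + ((d + 1 : Nat) : Int) = l + (d : Int) + 1 := by push_cast; ring
    rw [ecc]
    have ih1 := ih (l + 1) (by omega) (by omega)
    have ih2 := ih l hl1 (by omega)
    have hps1 : psum nums1 (l + (d : Int) + 1).toNat
        = psum nums1 (l + (d : Int)).toNat + PySem.List.pyGetD nums1 (l + (d : Int) + 1) 0 := by
      have h := psum_int nums1 (l + (d : Int) + 1) (by omega)
      have e : l + (d : Int) + 1 - 1 = l + (d : Int) := by ring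
      rw [e] at h
      exact h
    have hpsl : psum nums1 l.toNat = psum nums1 (l - 1).toNat + PySem.List.pyGetD nums1 l 0 :=
      psum_int nums1 l hl1
    have e1 : l + 1 + (d : Int) = l + (d : Int) + 1 := by ring
    have e2 : l + 1 - 1 = l := by ring
    rw [e1, e2] at ih1
    rw [mul_max_of_nonneg _ _ (by norm_num : (0:Int) ≤ 2)]
    rw [← max_add_add_left]
    congr 1 <;> omega

-- table contents of B's 1-D array inside the inner countdown of right endpoint r
def Gi (nums1 : List Int) (r l0 : Int) : Int → Int :=
  fun l => if l0 < l ∧ l ≤ r then netval nums1 (r - l).toNat l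
           else if 1 ≤ l ∧ l ≤ l0 then netval nums1 (r - 1 - l).toNat l else 0

-- table contents after B's outer loop has processed right endpoints < r
def Go (nums1 : List Int) (r : Int) : Int → Int :=
  fun l => if 1 ≤ l ∧ l ≤ r - 1 then netval nums1 (r - 1 - l).toNat l else 0

lemma solution_alt_eq (n : Int) (nums : List Int) (hn : 1 ≤ n) :
    solution_alt n nums =
      PySem.Int.floordiv
        (psum (PySem.List.insert nums 0 0) n.toNat +
          netval (PySem.List.insert nums 0 0) (n - 1).toNat 1) 2 := by
  simp only [solution_alt]
  set nums1 := PySem.List.insert nums 0 0 with hnums1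
  have htotal : (PySem.List.pyRange 1 (n + 1) 1).foldl
      (fun t i => t + PySem.List.pyGetD nums1 i 0) 0 = psum nums1 n.toNat := by
    have h : (PySem.List.pyRange 1 (n + 1) 1).foldl
        (fun t i => t + PySem.List.pyGetD nums1 i 0) 0 = psum nums1 (n + 1 - 1).toNat := foldl_pyRange_inv
      (P := fun i t => t = psum nums1 (i - 1).toNat)
      (fun t i => t + PySem.List.pyGetD nums1 i 0) 1 (n + 1) 0 (by omega)
      (by norm_num; rfl)
      (by
        intro i t hi1 hi2 hP
        rw [hP]
        have e : i + 1 - 1 = i := by ring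
        rw [e, psum_int nums1 i hi1])
    have e : n + 1 - 1 = n := by ring
    rw [e] at h
    exact h
  have hstepOut : ∀ (r : Int) (e : List Int), 1 ≤ r → r < n + 1 →
      e = Vec1 (n + 2) (Go nums1 r) →
      (PySem.List.pyRange (r - 1) 0 (-1)).foldl (fun e l =>
        PySem.List.pySetD e l
          (max (PySem.List.pyGetD nums1 l 0 - PySem.List.pyGetD e (l + 1) 0)
               (PySem.List.pyGetD nums1 r 0 - PySem.List.pyGetD e l 0)))
        (PySem.List.pySetD e r (PySem.List.pyGetD nums1 r 0))
      = Vec1 (n + 2) (Go nums1 (r + 1)) := by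
    intro r e hr1 hr2 hP
    have hset1 : PySem.List.pySetD e r (PySem.List.pyGetD nums1 r 0)
        = Vec1 (n + 2) (Gi nums1 r (r - 1)) := by
      rw [hP, vset_Vec1 (n + 2) _ r _ (by omega) (by omega)]
      apply Vec1_congr
      intro j hj1 hj2
      unfold Go Gi
      by_cases hjr : j = r
      · rw [if_pos hjr, if_pos (by omega), hjr]
        have hz : r - r = 0 := by ring
        rw [hz]
        rfl
      · rw [if_neg hjr]
        by_cases hc : 1 ≤ j ∧ j ≤ r - 1
        · rw [if_pos hc, if_neg (by omega)]
        · rw [if_neg hc, if_neg (by omega)]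
    rw [hset1]
    have hinner : (PySem.List.pyRange (r - 1) 0 (-1)).foldl (fun e l =>
        PySem.List.pySetD e l
          (max (PySem.List.pyGetD nums1 l 0 - PySem.List.pyGetD e (l + 1) 0)
               (PySem.List.pyGetD nums1 r 0 - PySem.List.pyGetD e l 0)))
        (Vec1 (n + 2) (Gi nums1 r (r - 1)))
        = Vec1 (n + 2) (Gi nums1 r 0) := foldl_pyRange_neg_inv
      (P := fun l0 e => e = Vec1 (n + 2) (Gi nums1 r l0))
      (fun e l =>
        PySem.List.pySetD e l
          (max (PySem.List.pyGetD nums1 l 0 - PySem.List.pyGetD e (l + 1) 0)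
               (PySem.List.pyGetD nums1 r 0 - PySem.List.pyGetD e l 0)))
      (r - 1) 0 _ (by omega) rfl
      (by
        intro l e' hl1 hl2 hR
        rw [hR]
        beta_reduce
        rw [vget_Vec1 (n + 2) _ (l + 1) (by omega) (by omega)]
        rw [vget_Vec1 (n + 2) _ l (by omega) (by omega)]
        have hg1 : Gi nums1 r l (l + 1) = netval nums1 (r - (l + 1)).toNat (l + 1) := by
          unfold Gi
          rw [if_pos (by omega)]
        have hg2 : Gi nums1 r l l = netval nums1 (r - 1 - l).toNat l := by
          unfold Gi
          rw [if_neg (by omega), if_pos (by omega)]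
        rw [hg1, hg2]
        rw [vset_Vec1 (n + 2) _ l _ (by omega) (by omega)]
        apply Vec1_congr
        intro j hj1 hj2
        by_cases hjl : j = l
        · rw [if_pos hjl]
          unfold Gi
          rw [if_pos (by omega)]
          have hnet := netval_int nums1 (r - l) l (by omega)
          have e1 : r - l - 1 = r - (l + 1) := by ring
          have e2 : l + (r - l) = r := by ring
          rw [e1, e2] at hnet
          have e3 : r - 1 - l = r - (l + 1) := by ring
          rw [hjl, hnet, e3]
        · rw [if_neg hjl]
          unfold Gi
          by_cases hc : l - 1 < j ∧ j ≤ r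
          · rw [if_pos hc, if_pos (by omega)]
          · rw [if_neg hc, if_neg (by omega)]
            by_cases hd : 1 ≤ j ∧ j ≤ l - 1
            · rw [if_pos hd, if_pos (by omega)]
            · rw [if_neg hd, if_neg (by omega)])
    rw [hinner]
    apply Vec1_congr
    intro j hj1 hj2
    unfold Gi Go
    by_cases hc : 0 < j ∧ j ≤ r
    · rw [if_pos hc, if_pos (by omega)]
      have e : r + 1 - 1 - j = r - j := by ring
      rw [e]
    · rw [if_neg hc, if_neg (by omega), if_neg (by omega)]
  have houter : (PySem.List.pyRange 1 (n + 1) 1).foldl (fun e r =>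
      (PySem.List.pyRange (r - 1) 0 (-1)).foldl (fun e l =>
        PySem.List.pySetD e l
          (max (PySem.List.pyGetD nums1 l 0 - PySem.List.pyGetD e (l + 1) 0)
               (PySem.List.pyGetD nums1 r 0 - PySem.List.pyGetD e l 0)))
        (PySem.List.pySetD e r (PySem.List.pyGetD nums1 r 0)))
      (List.replicate (n + 2).toNat (0 : Int))
      = Vec1 (n + 2) (Go nums1 (n + 1)) :=
    foldl_pyRange_inv
      (P := fun r e => e = Vec1 (n + 2) (Go nums1 r))
      _ 1 (n + 1) _ (by omega)
      (by
        rw [replicate_eq_Vec1]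
        apply Vec1_congr
        intro j hj1 hj2
        unfold Go
        rw [if_neg (by omega)])
      hstepOut
  rw [htotal, houter]
  rw [vget_Vec1 (n + 2) _ 1 (by omega) (by omega)]
  unfold Go
  rw [if_pos (by omega)]
  have e : n + 1 - 1 - 1 = n - 1 := by ring
  rw [e]

-- ===== VERDICT (by name: the statement is the Claim_ definition above) =====
theorem solution_spec : Claim_equal_solution := by
  intro n nums _hdom hpre
  obtain ⟨hn1, hn2⟩ := hpre
  unfold Spec_solution
  rw [solution_eq_gval n nums hn1, solution_alt_eq n nums hn1]
  set nums1 := PySem.List.insert nums 0 0 with hnums1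
  have hbridge := two_gval n nums1 (n - 1).toNat 1 (by omega)
    (by rw [Int.toNat_of_nonneg (by omega)]; omega)
  rw [Int.toNat_of_nonneg (by omega : (0:Int) ≤ n - 1)] at hbridge
  have e1 : (1 : Int) + (n - 1) = n := by ring
  have e2 : (1 : Int) - 1 = 0 := by ring
  rw [e1, e2] at hbridge
  have hps0 : psum nums1 (0 : Int).toNat = 0 := rfl
  rw [hps0] at hbridge
  rw [PySem.Int.floordiv_eq_ediv_of_pos (by norm_num)]
  omega
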